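-- pv_equiv track=rewrite | github.com/arnoringi/forritun | Assignment 16 (Top 100 Chess Players)/16_1) Part 1.py | create_byear_dict
-- ===== SOURCE A (Python) =====
-- BYEAR = 3
--
-- def create_byear_dict(dict_players):
--     byear_dict = {}
--
--     for chess_player, chess_player_data in dict_players.items():
--         byear = chess_player_data[BYEAR]
--         if byear in byear_dict:
--             name_list = byear_dict[byear]
--             name_list.append(chess_player)
--         else:
--
--             byear_dict[byear] = [chess_player]
--     return byear_dict
-- ===== SOURCE B (Python) =====
-- BYEAR = 3
--
-- def create_byear_dict(dict_players):
--     items = list(dict_players.items())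
--     years = []
--     for _name, data in items:
--         byear = data[BYEAR]
--         if byear not in years:
--             years.append(byear)
--     return {y: [name for name, data in items if data[BYEAR] == y] for y in years}
-- ===== Notes on version B (the rewrite author's own statement) =====
-- stated objective: alternative
-- what changed: Instead of accumulating names into a dict in one pass, B first collects the distinct birth years in first-occurrence order and then builds each year's name list with a separate filtering pass over the items.
import Mathlib
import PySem

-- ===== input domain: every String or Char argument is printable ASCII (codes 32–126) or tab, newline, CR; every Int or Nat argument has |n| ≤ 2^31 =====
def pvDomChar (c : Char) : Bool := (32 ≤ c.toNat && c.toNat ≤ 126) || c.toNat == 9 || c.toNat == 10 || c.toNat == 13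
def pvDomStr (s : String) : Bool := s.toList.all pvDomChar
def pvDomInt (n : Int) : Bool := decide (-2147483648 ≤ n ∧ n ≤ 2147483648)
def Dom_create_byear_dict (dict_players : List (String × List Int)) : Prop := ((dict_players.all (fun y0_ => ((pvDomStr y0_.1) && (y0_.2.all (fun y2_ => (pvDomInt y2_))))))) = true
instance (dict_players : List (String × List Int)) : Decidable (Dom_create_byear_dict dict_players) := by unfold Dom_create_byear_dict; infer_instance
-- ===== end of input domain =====

-- B builds the same grouping by a different decomposition (distinct-years pass + a filter per year)
-- instead of A's single accumulating-dict pass; objective: alternative (no speed claim).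

-- ===== PORT A =====
-- A's loop body: byear = data[BYEAR]; if byear in dict append, else start a new list.
-- (outside Pre_, where Python raises IndexError, the port skips the offending item)
def pvStepA (d : PySem.Dict Int (List String)) (p : String × List Int) : PySem.Dict Int (List String) :=
  match PySem.List.pyGet? p.2 3 with
  | none => d
  | some byear =>
    if d.contains byear then
      d.insert byear (d.getD byear [] ++ [p.1])
    else
      d.insert byear [p.1]

def create_byear_dict (dict_players : List (String × List Int)) : List (Int × List String) :=
  (dict_players.foldl pvStepA PySem.Dict.empty).items

-- ===== PORT B =====
-- distinct birth years in first-occurrence order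
def pvYears (dict_players : List (String × List Int)) : List Int :=
  dict_players.foldl
    (fun ys p =>
      match PySem.List.pyGet? p.2 3 with
      | none => ys
      | some byear => if byear ∈ ys then ys else ys ++ [byear])
    []

-- [name for name, data in items if data[BYEAR] == y]
def pvNames (dict_players : List (String × List Int)) (y : Int) : List String :=
  (dict_players.filter (fun p => PySem.List.pyGet? p.2 3 == some y)).map Prod.fst

def create_byear_dict_alt (dict_players : List (String × List Int)) : List (Int × List String) :=
  (pvYears dict_players).map (fun y => (y, pvNames dict_players y))

-- ===== PRECONDITION & SPEC =====
-- Pre_ excludes exactly the inputs on which Python A raises IndexError: some player's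
-- data list is too short for data[BYEAR] (= data[3]).
def Pre_create_byear_dict (dict_players : List (String × List Int)) : Prop :=
  ∀ p ∈ dict_players, 4 ≤ p.2.length
instance (dict_players : List (String × List Int)) : Decidable (Pre_create_byear_dict dict_players) := by unfold Pre_create_byear_dict; infer_instance

def pvWitness_create_byear_dict : (List (String × List Int)) :=
  [("mag", [1, 2, 3, 1990]), ("bob", [0, 0, 0, 1990]), ("al", [9, 9, 9, 1985])]

def Spec_create_byear_dict (dict_players : List (String × List Int)) (out : List (Int × List String)) : Prop := out = create_byear_dict_alt dict_players
instance (dict_players : List (String × List Int)) (out : List (Int × List String)) : Decidable (Spec_create_byear_dict dict_players out) := by unfold Spec_create_byear_dict; infer_instance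

-- ===== CLAIM (what is proved, stated in full; the proofs are below) =====
def Claim_equal_create_byear_dict : Prop := ∀ (dict_players : List (String × List Int)), Dom_create_byear_dict dict_players → Pre_create_byear_dict dict_players → Spec_create_byear_dict dict_players (create_byear_dict dict_players)

-- ===== LEMMAS AND PROOFS =====

theorem pvYears_append_singleton (seen : List (String × List Int)) (p : String × List Int) :
    pvYears (seen ++ [p]) =
      match PySem.List.pyGet? p.2 3 with
      | none => pvYears seen
      | some byear => if byear ∈ pvYears seen then pvYears seen else pvYears seen ++ [byear] := by
  simp [pvYears, List.foldl_append]

theorem pvNames_append_singleton (seen : List (String × List Int)) (p : String × List Int) (y : Int) :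
    pvNames (seen ++ [p]) y =
      pvNames seen y ++ (if PySem.List.pyGet? p.2 3 == some y then [p.1] else []) := by
  simp only [pvNames, List.filter_append, List.map_append]
  by_cases h : PySem.List.pyGet? p.2 3 == some y <;> simp [List.filter, h]

theorem mem_pvYears_aux (l : List (String × List Int)) (y : Int) :
    ∀ ys : List Int, (y ∈ ys ∨ ∃ q ∈ l, PySem.List.pyGet? q.2 3 = some y) →
      y ∈ l.foldl (fun ys p =>
        match PySem.List.pyGet? p.2 3 with
        | none => ys
        | some byear => if byear ∈ ys then ys else ys ++ [byear]) ys := by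
  induction l with
  | nil => intro ys h; simpa using h.resolve_right (by simp)
  | cons p rest ih =>
    intro ys h
    simp only [List.foldl_cons]
    cases hy : PySem.List.pyGet? p.2 3 with
    | none =>
      apply ih
      rcases h with h | ⟨q, hq, hqy⟩
      · exact Or.inl h
      · rcases List.mem_cons.mp hq with rfl | hq'
        · exact absurd (hy ▸ hqy) (by simp)
        · exact Or.inr ⟨q, hq', hqy⟩
    | some b =>
      apply ih
      rcases h with h | ⟨q, hq, hqy⟩
      · left; by_cases hm : b ∈ ys <;> simp [hm, h]
      · rcases List.mem_cons.mp hq with rfl | hq'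
        · left
          have : b = y := by rw [hy] at hqy; exact (Option.some.injEq _ _ ▸ hqy : some b = some y) |> Option.some.inj
          subst this
          by_cases hm : b ∈ ys <;> simp [hm]
        · exact Or.inr ⟨q, hq', hqy⟩

theorem mem_pvYears_of (seen : List (String × List Int)) (q : String × List Int)
    (hq : q ∈ seen) (y : Int) (h : PySem.List.pyGet? q.2 3 = some y) : y ∈ pvYears seen :=
  mem_pvYears_aux seen y [] (Or.inr ⟨q, hq, h⟩)

-- lookup in the dict whose items are B's grouping
theorem get?_mk_alt (ys : List Int) (f : Int → List String) (y : Int) :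
    (PySem.Dict.mk (ys.map (fun y' => (y', f y')))).get? y =
      if y ∈ ys then some (f y) else none := by
  induction ys with
  | nil => simp [PySem.Dict.get?]
  | cons a rest ih =>
    simp only [List.map_cons, PySem.Dict.get?_mk_cons, ih]
    by_cases h : a = y
    · simp [h]
    · have h' : ¬ y = a := fun hh => h hh.symm
      have hb : (a == y) = false := by simp [h]
      simp [hb, List.mem_cons, or_iff_right h']

theorem contains_eq_isSome (d : PySem.Dict Int (List String)) (y : Int) :
    d.contains y = (d.get? y).isSome := PySem.Dict.contains_eq_isSome_get? d y

theorem stepA_alt (seen : List (String × List Int)) (p : String × List Int) :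
    pvStepA (PySem.Dict.mk (create_byear_dict_alt seen)) p =
      PySem.Dict.mk (create_byear_dict_alt (seen ++ [p])) := by
  unfold pvStepA
  cases hy : PySem.List.pyGet? p.2 3 with
  | none =>
    dsimp only
    simp only [create_byear_dict_alt, pvYears_append_singleton, hy]
    congr 1
    apply List.map_congr_left
    intro y _
    rw [pvNames_append_singleton]
    simp [hy]
  | some byear =>
    dsimp only
    have hget := get?_mk_alt (pvYears seen) (pvNames seen) byear
    have hcont : (PySem.Dict.mk (create_byear_dict_alt seen)).contains byear
        = decide (byear ∈ pvYears seen) := by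
      rw [create_byear_dict_alt, contains_eq_isSome, hget]
      by_cases h : byear ∈ pvYears seen <;> simp [h]
    by_cases hm : byear ∈ pvYears seen
    · -- existing key: overwrite in place
      rw [hcont]
      simp only [hm, decide_true, if_true]
      have hgetD : (PySem.Dict.mk (create_byear_dict_alt seen)).getD byear [] = pvNames seen byear := by
        rw [PySem.Dict.getD_eq_get?_getD, create_byear_dict_alt, hget]
        simp [hm]
      rw [hgetD]
      apply PySem.Dict.ext
      rw [PySem.Dict.items_insert_of_contains]
      · simp only [create_byear_dict_alt, pvYears_append_singleton, hy, hm, if_true,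
          List.map_map]
        apply List.map_congr_left
        intro y hyy
        simp only [Function.comp]
        rw [pvNames_append_singleton]
        by_cases h : y = byear
        · subst h; simp [hy]
        · have hb : (y == byear) = false := by simp [h]
          have hb2 : (PySem.List.pyGet? p.2 3 == some y) = false := by
            rw [hy]; simpa using fun hh => h hh.symm
          simp [hb, hb2]
      · rw [hcont]; simp [hm]
    · -- new key: append
      rw [hcont]
      simp only [hm, decide_false, Bool.false_eq_true, if_false]
      apply PySem.Dict.ext
      rw [PySem.Dict.items_insert_of_not_contains]
      · simp only [create_byear_dict_alt, pvYears_append_singleton, hy, hm, if_false]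
        rw [List.map_append]
        congr 1
        · apply List.map_congr_left
          intro y hyy
          rw [pvNames_append_singleton]
          have hb2 : (PySem.List.pyGet? p.2 3 == some y) = false := by
            rw [hy, beq_eq_false_iff_ne]
            intro hh; exact hm ((Option.some.inj hh) ▸ hyy)
          simp [hb2]
        · simp only [List.map_cons, List.map_nil]
          rw [pvNames_append_singleton]
          have hnames : pvNames seen byear = [] := by
            simp only [pvNames, List.map_eq_nil_iff, List.filter_eq_nil_iff]
            intro q hq hqq
            exact hm (mem_pvYears_of seen q hq byear (by simpa using hqq))
          simp [hnames, hy]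
      · rw [hcont]; simp [hm]

theorem foldA_alt (l seen : List (String × List Int)) :
    l.foldl pvStepA (PySem.Dict.mk (create_byear_dict_alt seen)) =
      PySem.Dict.mk (create_byear_dict_alt (seen ++ l)) := by
  induction l generalizing seen with
  | nil => simp
  | cons p rest ih =>
    simp only [List.foldl_cons]
    rw [stepA_alt, ih]
    simp [List.append_assoc]

-- ===== VERDICT (by name: the statement is the Claim_ definition above) =====
theorem create_byear_dict_spec : Claim_equal_create_byear_dict := by
  intro l _ _
  unfold Spec_create_byear_dict create_byear_dict
  have h0 : PySem.Dict.empty = PySem.Dict.mk (create_byear_dict_alt ([] : List (String × List Int))) := rfl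
  rw [h0, foldA_alt]
  rfl
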